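-- pv_equiv track=rewrite | github.com/pypi-data/pypi-mirror-354 | packages/hashkit/hashkit-1.0.0.tar.gz/hashkit-1.0.0/hashkit/analyzer.py | _classify_charset
-- ===== SOURCE A (Python) =====
-- import string
--
-- def _classify_charset(hash_value: str) -> str:
--     """Classify character set of a hash"""
--     if all(c in '0123456789abcdef' for c in hash_value):
--         return 'hex_lower'
--     elif all(c in '0123456789ABCDEF' for c in hash_value):
--         return 'hex_upper'
--     elif all(c in '0123456789abcdefABCDEF' for c in hash_value):
--         return 'hex_mixed'
--     elif all(c in string.ascii_letters + string.digits + '+/=' for c in hash_value):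
--         return 'base64'
--     else:
--         return 'mixed'
-- ===== SOURCE B (Python) =====
-- def _classify_charset(hash_value: str) -> str:
--     """Classify character set of a hash"""
--     # Single pass: classify each character into one of five disjoint categories
--     # and accumulate four flags; the verdict is read off the flags at the end.
--     lower_hex = upper_hex = base64_extra = other = False
--     for c in hash_value:
--         if '0' <= c <= '9':
--             continue
--         if 'a' <= c <= 'f':
--             lower_hex = True
--         elif 'A' <= c <= 'F':
--             upper_hex = True
--         elif 'a' <= c <= 'z' or 'A' <= c <= 'Z' or c in '+/=':
--             base64_extra = True
--         else:
--             other = True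
--     if other:
--         return 'mixed'
--     if base64_extra:
--         return 'base64'
--     if lower_hex and upper_hex:
--         return 'hex_mixed'
--     if upper_hex:
--         return 'hex_upper'
--     return 'hex_lower'
-- ===== Notes on version B (the rewrite author's own statement) =====
-- stated objective: alternative
-- what changed: B makes a single pass over the string, classifying each character into one of five disjoint categories and accumulating four boolean flags, then reads the verdict off the flags, instead of A's up-to-four whole-string membership scans against overlapping alphabets.
import Mathlib
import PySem

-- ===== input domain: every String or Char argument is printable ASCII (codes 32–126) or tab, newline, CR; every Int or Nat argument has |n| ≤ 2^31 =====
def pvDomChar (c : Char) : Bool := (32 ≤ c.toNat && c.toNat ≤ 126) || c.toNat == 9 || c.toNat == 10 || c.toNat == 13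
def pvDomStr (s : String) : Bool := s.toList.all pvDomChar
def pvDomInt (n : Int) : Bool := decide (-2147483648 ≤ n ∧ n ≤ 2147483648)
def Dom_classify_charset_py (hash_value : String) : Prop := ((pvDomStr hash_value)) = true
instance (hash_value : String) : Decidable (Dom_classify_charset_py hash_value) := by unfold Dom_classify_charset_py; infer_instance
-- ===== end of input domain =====

set_option maxRecDepth 16384

-- B replaces A's four whole-string membership scans by one pass that classifies each
-- character into a disjoint category and accumulates four flags (simpler single-pass decomposition).
-- ===== PORT A =====
def classify_charset_py (hash_value : String) : String :=
  if hash_value.toList.all (fun c => "0123456789abcdef".toList.contains c) then "hex_lower"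
  else if hash_value.toList.all (fun c => "0123456789ABCDEF".toList.contains c) then "hex_upper"
  else if hash_value.toList.all (fun c => "0123456789abcdefABCDEF".toList.contains c) then "hex_mixed"
  else if hash_value.toList.all (fun c => ("abcdefghijklmnopqrstuvwxyzABCDEFGHIJKLMNOPQRSTUVWXYZ" ++ "0123456789" ++ "+/=").toList.contains c) then "base64"
  else "mixed"

-- ===== PORT B =====
-- the per-character category tests of Source B's loop
def bIsDigit (c : Char) : Bool := '0' ≤ c && c ≤ '9'
def bIsLowHex (c : Char) : Bool := 'a' ≤ c && c ≤ 'f'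
def bIsUpHex (c : Char) : Bool := 'A' ≤ c && c ≤ 'F'
def bIsB64Extra (c : Char) : Bool :=
  ('a' ≤ c && c ≤ 'z') || ('A' ≤ c && c ≤ 'Z') || "+/=".toList.contains c

-- Source B's for-loop: one pass accumulating the four flags
def bLoop : List Char → Bool × Bool × Bool × Bool → Bool × Bool × Bool × Bool
  | [], s => s
  | c :: cs, (lf, uf, b64, oth) =>
      if bIsDigit c then bLoop cs (lf, uf, b64, oth)
      else if bIsLowHex c then bLoop cs (true, uf, b64, oth)
      else if bIsUpHex c then bLoop cs (lf, true, b64, oth)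
      else if bIsB64Extra c then bLoop cs (lf, uf, true, oth)
      else bLoop cs (lf, uf, b64, true)

def classify_charset_py_alt (hash_value : String) : String :=
  match bLoop hash_value.toList (false, false, false, false) with
  | (lf, uf, b64, oth) =>
    if oth then "mixed"
    else if b64 then "base64"
    else if lf && uf then "hex_mixed"
    else if uf then "hex_upper"
    else "hex_lower"

-- ===== PRECONDITION & SPEC =====
def Spec_classify_charset_py (hash_value : String) (out : String) : Prop := out = classify_charset_py_alt hash_value
instance (hash_value : String) (out : String) : Decidable (Spec_classify_charset_py hash_value out) := by unfold Spec_classify_charset_py; infer_instance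

-- ===== CLAIM (what is proved, stated in full; the proofs are below) =====
def Claim_equal_classify_charset_py : Prop := ∀ (hash_value : String), Dom_classify_charset_py hash_value → Spec_classify_charset_py hash_value (classify_charset_py hash_value)

-- ===== LEMMAS AND PROOFS =====
-- the categories B's loop effectively records (with the elif-negations folded in)
def pLF (c : Char) : Bool := !bIsDigit c && bIsLowHex c
def pUF (c : Char) : Bool := !bIsDigit c && !bIsLowHex c && bIsUpHex c
def pB64 (c : Char) : Bool := !bIsDigit c && !bIsLowHex c && !bIsUpHex c && bIsB64Extra c
def pOth (c : Char) : Bool := !bIsDigit c && !bIsLowHex c && !bIsUpHex c && !bIsB64Extra c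

-- the loop ORs each flag with "some character of the rest falls in that category"
lemma bLoop_char (xs : List Char) : ∀ lf uf b64 oth,
    bLoop xs (lf, uf, b64, oth) =
      (lf || xs.any pLF, uf || xs.any pUF, b64 || xs.any pB64, oth || xs.any pOth) := by
  induction xs with
  | nil => intro lf uf b64 oth; simp [bLoop]
  | cons c cs ih =>
    intro lf uf b64 oth
    simp only [bLoop]
    split_ifs with h1 h2 h3 h4 <;>
      simp [ih, pLF, pUF, pB64, pOth, h1, *, List.any_cons, Bool.or_assoc, Bool.or_comm,
        Bool.or_left_comm]

-- per-character bridges between A's alphabets and B's categories, on the ASCII domain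
lemma char_hexlower (c : Char) (h : pvDomChar c = true) :
    ("0123456789abcdef".toList.contains c) = !(pUF c || pB64 c || pOth c) := by
  have h128 : c.toNat < 128 := by
    unfold pvDomChar at h
    simp only [Bool.or_eq_true, Bool.and_eq_true, decide_eq_true_eq, beq_iff_eq, Nat.le_iff_lt_or_eq] at h
    omega
  have : ∀ n : Fin 128, ("0123456789abcdef".toList.contains (Char.ofNat n.val)) =
      !(pUF (Char.ofNat n.val) || pB64 (Char.ofNat n.val) || pOth (Char.ofNat n.val)) := by decide
  have hc : Char.ofNat c.toNat = c := Char.ofNat_toNat c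
  simpa [hc] using this ⟨c.toNat, h128⟩

lemma char_hexupper (c : Char) (h : pvDomChar c = true) :
    ("0123456789ABCDEF".toList.contains c) = !(pLF c || pB64 c || pOth c) := by
  have h128 : c.toNat < 128 := by
    unfold pvDomChar at h
    simp only [Bool.or_eq_true, Bool.and_eq_true, decide_eq_true_eq, beq_iff_eq, Nat.le_iff_lt_or_eq] at h
    omega
  have : ∀ n : Fin 128, ("0123456789ABCDEF".toList.contains (Char.ofNat n.val)) =
      !(pLF (Char.ofNat n.val) || pB64 (Char.ofNat n.val) || pOth (Char.ofNat n.val)) := by decide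
  have hc : Char.ofNat c.toNat = c := Char.ofNat_toNat c
  simpa [hc] using this ⟨c.toNat, h128⟩

lemma char_hexmixed (c : Char) (h : pvDomChar c = true) :
    ("0123456789abcdefABCDEF".toList.contains c) = !(pB64 c || pOth c) := by
  have h128 : c.toNat < 128 := by
    unfold pvDomChar at h
    simp only [Bool.or_eq_true, Bool.and_eq_true, decide_eq_true_eq, beq_iff_eq, Nat.le_iff_lt_or_eq] at h
    omega
  have : ∀ n : Fin 128, ("0123456789abcdefABCDEF".toList.contains (Char.ofNat n.val)) =
      !(pB64 (Char.ofNat n.val) || pOth (Char.ofNat n.val)) := by decide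
  have hc : Char.ofNat c.toNat = c := Char.ofNat_toNat c
  simpa [hc] using this ⟨c.toNat, h128⟩

lemma char_base64 (c : Char) (h : pvDomChar c = true) :
    (("abcdefghijklmnopqrstuvwxyzABCDEFGHIJKLMNOPQRSTUVWXYZ" ++ "0123456789" ++ "+/=").toList.contains c) = !(pOth c) := by
  have h128 : c.toNat < 128 := by
    unfold pvDomChar at h
    simp only [Bool.or_eq_true, Bool.and_eq_true, decide_eq_true_eq, beq_iff_eq, Nat.le_iff_lt_or_eq] at h
    omega
  have : ∀ n : Fin 128, (("abcdefghijklmnopqrstuvwxyzABCDEFGHIJKLMNOPQRSTUVWXYZ" ++ "0123456789" ++ "+/=").toList.contains (Char.ofNat n.val)) = !(pOth (Char.ofNat n.val)) := by decide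
  have hc : Char.ofNat c.toNat = c := Char.ofNat_toNat c
  simpa [hc] using this ⟨c.toNat, h128⟩

-- xs.all (fun c => !(p c || q c)) = !(xs.any p || xs.any q), etc.
lemma all_not_or₂ (xs : List Char) (p q : Char → Bool) :
    xs.all (fun c => !(p c || q c)) = !(xs.any p || xs.any q) := by
  induction xs with
  | nil => simp
  | cons c cs ih =>
    simp only [List.all_cons, List.any_cons, ih]
    cases p c <;> cases q c <;> simp

lemma all_not_or₃ (xs : List Char) (p q r : Char → Bool) :
    xs.all (fun c => !(p c || q c || r c)) = !(xs.any p || xs.any q || xs.any r) := by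
  induction xs with
  | nil => simp
  | cons c cs ih =>
    simp only [List.all_cons, List.any_cons, ih]
    cases p c <;> cases q c <;> cases r c <;> simp

lemma all_not₁ (xs : List Char) (p : Char → Bool) :
    xs.all (fun c => !(p c)) = !(xs.any p) := by
  induction xs with
  | nil => simp
  | cons c cs ih => simp [List.all_cons, List.any_cons, ih]

-- congruence for `all` under the domain hypothesis
lemma all_congr_dom (xs : List Char) (hdom : xs.all pvDomChar = true) (f g : Char → Bool)
    (h : ∀ c, pvDomChar c = true → f c = g c) : xs.all f = xs.all g := by
  induction xs with
  | nil => rfl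
  | cons c cs ih =>
    simp only [List.all_cons, Bool.and_eq_true] at hdom
    simp [List.all_cons, h c hdom.1, ih hdom.2]

-- ===== VERDICT (by name: the statement is the Claim_ definition above) =====
theorem classify_charset_py_spec : Claim_equal_classify_charset_py := by
  intro s hdom
  show _ = _
  have hdom' : s.toList.all pvDomChar = true := hdom
  unfold classify_charset_py classify_charset_py_alt
  rw [bLoop_char]
  rw [all_congr_dom _ hdom' _ (fun c => !(pUF c || pB64 c || pOth c)) char_hexlower,
      all_congr_dom _ hdom' _ (fun c => !(pLF c || pB64 c || pOth c)) char_hexupper,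
      all_congr_dom _ hdom' _ (fun c => !(pB64 c || pOth c)) char_hexmixed,
      all_congr_dom _ hdom' _ (fun c => !(pOth c)) char_base64,
      all_not_or₃, all_not_or₃, all_not_or₂, all_not₁]
  cases hLF : s.toList.any pLF <;> cases hUF : s.toList.any pUF <;>
    cases hB : s.toList.any pB64 <;> cases hO : s.toList.any pOth <;> simp
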